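-- pv_equiv track=rewrite | github.com/arun1011/ocr-data-extraction | ai_textclass.py | word_mix
-- ===== SOURCE A (Python) =====
-- def chr_type(chrx):
--     if chrx.isalpha()==True:
--         return 'a'
--     elif chrx.isdigit()==True:
--         return 'n'
--     else:
--         return 's'
--
-- def word_mix(txt):
--     txt=txt.lower().strip()
--     if len(txt)==1:
--         return chr_type(txt)
--     elif len(txt)>1:
--         wm=[]
--         wmix=""
--         for t in txt:
--             wm.append(chr_type(t))
--         wm=sorted(set(wm))
--         for w in wm:
--             wmix=wmix+w
--         return wmix
-- ===== SOURCE B (Python) =====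
-- def word_mix(txt):
--     txt = txt.lower().strip()
--     if not txt:
--         return None
--     wmix = ""
--     if any(c.isalpha() for c in txt):
--         wmix += "a"
--     if any(c.isdigit() for c in txt):
--         wmix += "n"
--     if any(not c.isalpha() and not c.isdigit() for c in txt):
--         wmix += "s"
--     return wmix
-- ===== Notes on version B (the rewrite author's own statement) =====
-- stated objective: simpler
-- what changed: replaces the per-char code list, set dedup, sort and join-loop with three fixed-order existence scans (alpha, digit, other) that emit the sorted code string directly
-- outside the precondition, e.g. on word_mix('  '): A returns None, B returns None
import Mathlib
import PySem

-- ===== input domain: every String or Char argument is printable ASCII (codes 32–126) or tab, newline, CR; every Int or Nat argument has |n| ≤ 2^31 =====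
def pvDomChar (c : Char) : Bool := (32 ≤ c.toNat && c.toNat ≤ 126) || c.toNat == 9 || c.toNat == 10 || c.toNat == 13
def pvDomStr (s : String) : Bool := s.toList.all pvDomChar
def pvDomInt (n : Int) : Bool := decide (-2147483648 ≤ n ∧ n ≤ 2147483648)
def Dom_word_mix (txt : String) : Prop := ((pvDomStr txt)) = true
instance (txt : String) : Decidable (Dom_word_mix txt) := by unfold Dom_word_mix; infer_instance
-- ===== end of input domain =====

-- B replaces A's per-char code list + set + sort + join with three fixed-order existence
-- scans that produce the sorted code string directly (objective: simpler).

-- ===== PORT A =====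
-- Python chr_type takes a (1-char) string; its 1-char result string is represented as a Char.
def chr_type (chrx : List Char) : Char :=
  if PySem.Chars.strIsalpha chrx then 'a'
  else if PySem.Chars.strIsdigit chrx then 'n'
  else 's'

def word_mix (txt : String) : String :=
  let t := PySem.Chars.strip (PySem.Chars.lower txt.toList)
  if t.length = 1 then
    String.ofList [chr_type t]
  else if t.length > 1 then
    let wm := t.map (fun c => chr_type [c])
    let wm2 := PySem.List.sorted (PySem.Set.ofList wm) (fun x => x) false
    String.ofList (wm2.foldl (fun acc w => acc ++ [w]) [])
  else
    ""  -- Python returns None here (empty stripped text); excluded by Pre_word_mix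

-- ===== PORT B =====
def word_mix_alt (txt : String) : String :=
  let t := PySem.Chars.strip (PySem.Chars.lower txt.toList)
  if t = [] then
    ""  -- Python B returns None here; excluded by Pre_word_mix
  else
    String.ofList
      ((if t.any PySem.Chars.isalpha then ['a'] else []) ++
       (if t.any PySem.Chars.isdigit then ['n'] else []) ++
       (if t.any (fun c => !PySem.Chars.isalpha c && !PySem.Chars.isdigit c) then ['s'] else []))

-- ===== PRECONDITION & SPEC =====
-- Pre_ excludes strings whose lowered-stripped form is empty, on which A falls through and
-- returns None instead of a string.
def Pre_word_mix (txt : String) : Prop :=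
  PySem.Chars.strip (PySem.Chars.lower txt.toList) ≠ []
instance (txt : String) : Decidable (Pre_word_mix txt) := by unfold Pre_word_mix; infer_instance

def pvWitness_word_mix : String := "ab3!"

def Spec_word_mix (txt : String) (out : String) : Prop := out = word_mix_alt txt
instance (txt : String) (out : String) : Decidable (Spec_word_mix txt out) := by unfold Spec_word_mix; infer_instance

-- ===== CLAIM (what is proved, stated in full; the proofs are below) =====
def Claim_equal_word_mix : Prop := ∀ (txt : String), Dom_word_mix txt → Pre_word_mix txt → Spec_word_mix txt (word_mix txt)

-- ===== LEMMAS AND PROOFS =====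

lemma chr_type_single (c : Char) :
    chr_type [c] = if PySem.Chars.isalpha c then 'a'
                   else if PySem.Chars.isdigit c then 'n' else 's' := by
  simp [chr_type, PySem.Chars.strIsalpha, PySem.Chars.strIsdigit]

lemma not_isalpha_of_isdigit (c : Char) (h : PySem.Chars.isdigit c = true) :
    PySem.Chars.isalpha c = false := by
  simp [PySem.Chars.isdigit, PySem.Chars.isalpha, PySem.Chars.isupper, PySem.Chars.islower,
        Char.le_def, UInt32.le_iff_toNat_le] at *
  omega

lemma codes_mem (t : List Char) (x : Char) :
    x ∈ t.map (fun c => chr_type [c]) ↔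
      (x = 'a' ∧ t.any PySem.Chars.isalpha) ∨
      (x = 'n' ∧ t.any PySem.Chars.isdigit) ∨
      (x = 's' ∧ t.any (fun c => !PySem.Chars.isalpha c && !PySem.Chars.isdigit c)) := by
  simp only [List.mem_map, List.any_eq_true]
  constructor
  · rintro ⟨c, hc, rfl⟩
    rw [chr_type_single]
    by_cases ha : PySem.Chars.isalpha c
    · exact Or.inl ⟨by simp [ha], c, hc, ha⟩
    · by_cases hd : PySem.Chars.isdigit c
      · exact Or.inr (Or.inl ⟨by simp [ha, hd], c, hc, hd⟩)
      · exact Or.inr (Or.inr ⟨by simp [ha, hd], c, hc, by simp [ha, hd]⟩)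
  · rintro (⟨rfl, c, hc, h⟩ | ⟨rfl, c, hc, h⟩ | ⟨rfl, c, hc, h⟩)
    · exact ⟨c, hc, by rw [chr_type_single]; simp [h]⟩
    · exact ⟨c, hc, by rw [chr_type_single]; simp [h, not_isalpha_of_isdigit c h]⟩
    · simp only [Bool.and_eq_true, Bool.not_eq_true'] at h
      exact ⟨c, hc, by rw [chr_type_single]; simp [h.1, h.2]⟩

-- sorted(set(codes)) equals the three-membership concatenation, for any char list t
lemma sorted_set_codes (t : List Char) :
    PySem.List.sorted (PySem.Set.ofList (t.map (fun c => chr_type [c]))) (fun x => x) false =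
      (if t.any PySem.Chars.isalpha then ['a'] else []) ++
      (if t.any PySem.Chars.isdigit then ['n'] else []) ++
      (if t.any (fun c => !PySem.Chars.isalpha c && !PySem.Chars.isdigit c) then ['s'] else []) := by
  apply PySem.List.sorted_eq_of_perm_of_pairwise_lt
  · rw [List.perm_ext_iff_of_nodup (by split_ifs <;> decide) (PySem.Set.nodup_ofList _)]
    intro x
    rw [PySem.Set.mem_ofList, codes_mem]
    by_cases ha : t.any PySem.Chars.isalpha <;>
      by_cases hn : t.any PySem.Chars.isdigit <;>
        by_cases hs : t.any (fun c => !PySem.Chars.isalpha c && !PySem.Chars.isdigit c) <;>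
          simp [ha, hn, hs]
  · split_ifs <;> decide

-- ===== VERDICT (by name: the statement is the Claim_ definition above) =====
theorem word_mix_spec : Claim_equal_word_mix := by
  intro txt _ hpre
  unfold Pre_word_mix at hpre
  simp only [Spec_word_mix, word_mix, word_mix_alt]
  generalize PySem.Chars.strip (PySem.Chars.lower txt.toList) = t at hpre ⊢
  rw [if_neg hpre]
  by_cases h1 : t.length = 1
  · rw [if_pos h1]
    obtain ⟨c, rfl⟩ := List.length_eq_one_iff.mp h1
    congr 1
    rw [chr_type_single]
    by_cases hc1 : PySem.Chars.isalpha c <;> by_cases hc2 : PySem.Chars.isdigit c <;>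
      simp [hc1, hc2]
    exact absurd (not_isalpha_of_isdigit c hc2) (by simp [hc1])
  · have hgt : t.length > 1 := by
      have := List.length_pos_iff.mpr hpre
      omega
    rw [if_neg h1, if_pos hgt]
    rw [sorted_set_codes, PySem.List.foldl_append_singleton, List.nil_append]
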